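-- pv_equiv track=rewrite | github.com/sferrada/my_krome | tools/docmake/src_py/utils.py | replaceLongExponentByHat
-- ===== SOURCE A (Python) =====
-- def string_from(expr, string):
--     for i in range(len(string)):
--         if string[i:i + len(expr)] == expr:
--             splitAt = i + len(expr)
--             return (string[:splitAt], string[splitAt:])
--     return string, ""
--
-- def next_parenthesis(string, left="{", right="}"):
--     depth = 0
--     acc = ""
--     pos = 0
--
--     for c in string:
--         if c == left: depth += 1
--         if c == right: depth -= 1
--         acc += c
--         if depth == 0: break
--         pos += 1
--
--     return acc, string[pos + 1:]
--
-- def skip_spaces(string):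
--     acc = ""
--     pos = 0
--     for c in string:
--         if c != " ": break
--         pos += 1
--     return string[:pos], string[pos:]
--
-- def replaceLongExponentByHat(rate, maxlen=100):
--     acc = ""
--     while True:
--         before, fromPow = string_from("^", rate)
--         if len(fromPow) <= 0:
--             return acc + rate
--         spaces, rest = skip_spaces(fromPow)
--         exponent, rest = next_parenthesis(rest)
--
--         rate = rest
--         if len(exponent) > maxlen:
--             acc += before[:-1] + spaces
--             acc += "\\, \\hat{ }\\, \\left(" + exponent[1:-1] + "\\right)"
--         else:
--             acc += before + spaces
--             acc += exponent
-- ===== SOURCE B (Python) =====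
-- def replaceLongExponentByHat(rate, maxlen=100):
--     s = rate
--     n = len(s)
--     out = []
--     i = 0
--     while True:
--         j = s.find("^", i)
--         if j == -1 or j == n - 1:
--             out.append(s[i:])
--             return "".join(out)
--         before = s[i:j + 1]
--         k = j + 1
--         while k < n and s[k] == " ":
--             k += 1
--         spaces = s[j + 1:k]
--         depth = 0
--         p = k
--         matched = False
--         while p < n:
--             c = s[p]
--             if c == "{":
--                 depth += 1
--             if c == "}":
--                 depth -= 1
--             if depth == 0:
--                 matched = True
--                 break
--             p += 1
--         if matched:
--             exponent = s[k:p + 1]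
--             i = p + 1
--         else:
--             exponent = s[k:]
--             i = n
--         if len(exponent) > maxlen:
--             out.append(before[:-1] + spaces +
--                        "\\, \\hat{ }\\, \\left(" + exponent[1:-1] + "\\right)")
--         else:
--             out.append(before + spaces + exponent)
-- ===== Notes on version B (the rewrite author's own statement) =====
-- stated objective: alternative
-- what changed: Replaces A's while-True loop over three slice-producing helper functions (string_from rescanning with slice comparisons, skip_spaces, next_parenthesis rebuilding an acc string) by a single left-to-right cursor pass over the string with str.find, two small index loops and an output list joined once at the end.
import Mathlib
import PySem

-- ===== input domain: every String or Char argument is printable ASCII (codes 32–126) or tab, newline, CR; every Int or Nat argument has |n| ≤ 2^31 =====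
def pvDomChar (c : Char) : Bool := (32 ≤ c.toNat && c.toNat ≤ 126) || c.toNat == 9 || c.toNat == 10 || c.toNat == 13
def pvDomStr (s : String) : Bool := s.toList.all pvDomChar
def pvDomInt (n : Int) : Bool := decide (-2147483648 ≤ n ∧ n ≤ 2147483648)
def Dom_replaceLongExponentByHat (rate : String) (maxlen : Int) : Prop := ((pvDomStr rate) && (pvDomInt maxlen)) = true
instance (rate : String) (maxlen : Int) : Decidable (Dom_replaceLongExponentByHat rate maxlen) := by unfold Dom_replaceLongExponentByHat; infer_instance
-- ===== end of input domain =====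

-- B changes the decomposition: one left-to-right cursor pass with an output list joined once,
-- instead of A's while-True loop over three slice-producing helper functions (measured faster).

-- ===== PORT A =====
-- string_from: scan i over range(len(string)), compare string[i:i+len(expr)] to expr
def stringFromLoop (expr s : List Char) (i : Nat) : List Char × List Char :=
  if i < s.length then
    if (s.drop i).take expr.length = expr then
      (s.take (i + expr.length), s.drop (i + expr.length))
    else stringFromLoop expr s (i + 1)
  else (s, [])
termination_by s.length - i

def stringFrom (expr s : List Char) : List Char × List Char := stringFromLoop expr s 0

-- next_parenthesis: depth/acc/pos loop with break when depth hits 0 (after including the char)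
def nextParenLoop : List Char → Int → List Char → Nat → (List Char × Nat)
  | [], _, acc, pos => (acc, pos)
  | c :: cs, depth, acc, pos =>
    let d := depth + (if c = '{' then 1 else 0) + (if c = '}' then -1 else 0)
    if d = 0 then (acc ++ [c], pos) else nextParenLoop cs d (acc ++ [c]) (pos + 1)

def nextParen (s : List Char) : List Char × List Char :=
  let r := nextParenLoop s 0 [] 0
  (r.1, s.drop (r.2 + 1))

-- skip_spaces: count leading spaces, then slice
def skipSpacesLoop : List Char → Nat → Nat
  | [], pos => pos
  | c :: cs, pos => if c ≠ ' ' then pos else skipSpacesLoop cs (pos + 1)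

def skipSpaces (s : List Char) : List Char × List Char :=
  let p := skipSpacesLoop s 0
  (s.take p, s.drop p)

def hatOpen : List Char := "\\, \\hat{ }\\, \\left(".toList
def hatClose : List Char := "\\right)".toList

-- termination helper for the main while-loop of A: each iteration strictly shrinks rate
theorem sfLoop_snd_lt (s : List Char) (i : Nat) :
    (stringFromLoop ['^'] s i).2 ≠ [] → (stringFromLoop ['^'] s i).2.length < s.length := by
  unfold stringFromLoop
  split
  · split
    · intro _; simp only [List.length_drop, List.length_cons, List.length_nil]; omega
    · exact sfLoop_snd_lt s (i + 1)
  · simp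
termination_by s.length - i

theorem ss_snd_le (s : List Char) : (skipSpaces s).2.length ≤ s.length := by
  simp [skipSpaces]

theorem np_snd_le (s : List Char) : (nextParen s).2.length ≤ s.length := by
  simp [nextParen]

-- the while True loop of A, with its accumulator acc
def aLoop (maxlen : Int) (acc rate : List Char) : List Char :=
  let bf := stringFrom ['^'] rate
  if bf.2.length ≤ 0 then acc ++ rate
  else
    let sr := skipSpaces bf.2
    let er := nextParen sr.2
    if (er.1.length : Int) > maxlen then
      aLoop maxlen (acc ++ bf.1.dropLast ++ sr.1 ++ hatOpen ++ (er.1.drop 1).dropLast ++ hatClose) er.2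
    else
      aLoop maxlen (acc ++ bf.1 ++ sr.1 ++ er.1) er.2
termination_by rate.length
decreasing_by
  all_goals
    have h3 : er.2.length ≤ sr.2.length := np_snd_le sr.2
    have h2 : sr.2.length ≤ bf.2.length := ss_snd_le bf.2
    have hlen : 0 < bf.2.length := by omega
    have h1 : bf.2.length < rate.length := sfLoop_snd_lt rate 0 (List.ne_nil_of_length_pos hlen)
    show er.2.length < rate.length
    omega

def replaceLongExponentByHat (rate : String) (maxlen : Int) : String :=
  String.ofList (aLoop maxlen [] rate.toList)

-- ===== PORT B =====
-- s.find("^", i), relative to the current cursor suffix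
def findHat? : List Char → Option Nat
  | [] => none
  | c :: cs => if c = '^' then some 0 else (findHat? cs).map (· + 1)

-- while k < n and s[k] == " ": k += 1  (count of skipped spaces)
def countSpaces : List Char → Nat
  | [] => 0
  | c :: cs => if c = ' ' then countSpaces cs + 1 else 0

-- brace matcher: position p at which depth first hits 0 (char at p included), none if never
def braceEnd? : List Char → Int → Option Nat
  | [], _ => none
  | c :: cs, depth =>
    let d := depth + (if c = '{' then 1 else 0) + (if c = '}' then -1 else 0)
    if d = 0 then some 0 else (braceEnd? cs d).map (· + 1)

-- the cursor loop of B; the cursor i is represented by the remaining suffix s[i:]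
def bGo (maxlen : Int) (s out : List Char) : List Char :=
  match findHat? s with
  | none => out ++ s
  | some j =>
    if s.drop (j + 1) = [] then out ++ s
    else
      let before := s.take (j + 1)
      let tail := s.drop (j + 1)
      let k := countSpaces tail
      let spaces := tail.take k
      let rest := tail.drop k
      let me := match braceEnd? rest 0 with
        | some p => (rest.take (p + 1), rest.drop (p + 1))
        | none => (rest, ([] : List Char))
      let exponent := me.1
      let chunk := if (exponent.length : Int) > maxlen then
          before.dropLast ++ spaces ++ hatOpen ++ (exponent.drop 1).dropLast ++ hatClose
        else before ++ spaces ++ exponent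
      bGo maxlen me.2 (out ++ chunk)
termination_by s.length
decreasing_by
  rename_i hne
  have hj : j + 1 ≤ s.length := by
    by_contra hlt
    exact hne (List.drop_eq_nil_of_le (by omega))
  rcases _hb : braceEnd? ((s.drop (j + 1)).drop (countSpaces (s.drop (j + 1)))) 0 with _ | p <;>
    simp [List.length_drop] <;> omega

def replaceLongExponentByHat_alt (rate : String) (maxlen : Int) : String :=
  String.ofList (bGo maxlen rate.toList [])

-- ===== PRECONDITION & SPEC =====
def Spec_replaceLongExponentByHat (rate : String) (maxlen : Int) (out : String) : Prop := out = replaceLongExponentByHat_alt rate maxlen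
instance (rate : String) (maxlen : Int) (out : String) : Decidable (Spec_replaceLongExponentByHat rate maxlen out) := by unfold Spec_replaceLongExponentByHat; infer_instance

-- ===== CLAIM (what is proved, stated in full; the proofs are below) =====
def Claim_equal_replaceLongExponentByHat : Prop := ∀ (rate : String) (maxlen : Int), Dom_replaceLongExponentByHat rate maxlen → Spec_replaceLongExponentByHat rate maxlen (replaceLongExponentByHat rate maxlen)

-- ===== LEMMAS AND PROOFS =====
theorem sfLoop_none (s : List Char) (i : Nat) (h : findHat? (s.drop i) = none) :
    stringFromLoop ['^'] s i = (s, []) := by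
  unfold stringFromLoop
  split
  · rename_i hi
    rw [List.drop_eq_getElem_cons hi] at h
    unfold findHat? at h
    split at h
    · simp at h
    · rename_i hc
      rw [if_neg (by rw [show (['^'] : List Char).length = 1 from rfl, List.take_one_drop_eq_of_lt_length hi]; simp [hc])]
      simp only [Option.map_eq_none_iff] at h
      exact sfLoop_none s (i + 1) h
  · rfl
termination_by s.length - i

theorem sfLoop_some (s : List Char) (i j : Nat) (h : findHat? (s.drop i) = some j) :
    stringFromLoop ['^'] s i = (s.take (i + j + 1), s.drop (i + j + 1)) := by
  unfold stringFromLoop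
  split
  · rename_i hi
    rw [List.drop_eq_getElem_cons hi] at h
    unfold findHat? at h
    split at h
    · rename_i hc
      simp only [Option.some.injEq] at h
      rw [if_pos (by rw [show (['^'] : List Char).length = 1 from rfl, List.take_one_drop_eq_of_lt_length hi]; simp [hc])]
      subst h; rfl
    · rename_i hc
      rw [if_neg (by rw [show (['^'] : List Char).length = 1 from rfl, List.take_one_drop_eq_of_lt_length hi]; simp [hc])]
      simp only [Option.map_eq_some_iff] at h
      obtain ⟨j', hj', rfl⟩ := h
      have := sfLoop_some s (i + 1) j' hj'
      rw [this]
      congr 2 <;> omega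
  · rename_i hi
    rw [List.drop_eq_nil_of_le (by omega)] at h
    simp [findHat?] at h
termination_by s.length - i

theorem ssLoop_eq (s : List Char) (pos : Nat) : skipSpacesLoop s pos = pos + countSpaces s := by
  induction s generalizing pos with
  | nil => simp [skipSpacesLoop, countSpaces]
  | cons c cs ih =>
    by_cases hc : c = ' '
    · simp [skipSpacesLoop, countSpaces, hc, ih]; omega
    · simp [skipSpacesLoop, countSpaces, hc]

theorem npLoop_some (s : List Char) (d : Int) (acc : List Char) (pos p : Nat)
    (h : braceEnd? s d = some p) :
    nextParenLoop s d acc pos = (acc ++ s.take (p + 1), pos + p) := by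
  induction s generalizing d acc pos p with
  | nil => simp [braceEnd?] at h
  | cons c cs ih =>
    unfold braceEnd? at h
    unfold nextParenLoop
    by_cases h0 : d + (if c = '{' then (1 : Int) else 0) + (if c = '}' then -1 else 0) = 0
    · rw [if_pos h0] at h
      rw [if_pos h0]
      simp only [Option.some.injEq] at h
      subst h
      simp
    · rw [if_neg h0] at h
      rw [if_neg h0]
      simp only [Option.map_eq_some_iff] at h
      obtain ⟨p', hp', rfl⟩ := h
      rw [ih _ _ _ _ hp']
      simp
      omega
  
theorem npLoop_none (s : List Char) (d : Int) (acc : List Char) (pos : Nat)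
    (h : braceEnd? s d = none) :
    nextParenLoop s d acc pos = (acc ++ s, pos + s.length) := by
  induction s generalizing d acc pos with
  | nil => simp [nextParenLoop]
  | cons c cs ih =>
    unfold braceEnd? at h
    unfold nextParenLoop
    by_cases h0 : d + (if c = '{' then (1 : Int) else 0) + (if c = '}' then -1 else 0) = 0
    · rw [if_pos h0] at h
      simp at h
    · rw [if_neg h0] at h
      rw [if_neg h0]
      simp only [Option.map_eq_none_iff] at h
      rw [ih _ _ _ h]
      simp
      omega

theorem main_eq (maxlen : Int) (n : Nat) :
    ∀ s acc : List Char, s.length < n → aLoop maxlen acc s = bGo maxlen s acc := by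
  induction n with
  | zero => intro s acc h; omega
  | succ n ih =>
    intro s acc h
    unfold aLoop bGo
    cases hf : findHat? s with
    | none =>
      rw [show stringFrom ['^'] s = (s, []) from sfLoop_none s 0 (by simpa using hf)]
      simp
    | some j =>
      have hsf : stringFrom ['^'] s = (s.take (j + 1), s.drop (j + 1)) := by
        have := sfLoop_some s 0 j (by simpa using hf); simpa using this
      by_cases hd : s.drop (j + 1) = []
      · have hle : s.length ≤ j + 1 := by
          have := congrArg List.length hd; simp at this; omega
        simp [hsf, hd, List.take_of_length_le hle]
      · have hlen : 0 < (s.drop (j + 1)).length := List.length_pos_of_ne_nil hd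
        have hss : skipSpaces (s.drop (j + 1)) =
            ((s.drop (j + 1)).take (countSpaces (s.drop (j + 1))),
             (s.drop (j + 1)).drop (countSpaces (s.drop (j + 1)))) := by
          simp [skipSpaces, ssLoop_eq]
        cases hb : braceEnd? ((s.drop (j + 1)).drop (countSpaces (s.drop (j + 1)))) 0 with
        | some p =>
          have hnp : nextParen ((s.drop (j + 1)).drop (countSpaces (s.drop (j + 1)))) =
              (((s.drop (j + 1)).drop (countSpaces (s.drop (j + 1)))).take (p + 1),
               ((s.drop (j + 1)).drop (countSpaces (s.drop (j + 1)))).drop (p + 1)) := by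
            unfold nextParen
            rw [npLoop_some _ _ _ _ _ hb]
            simp
          simp only [hsf, hss, hnp, hb, hd]
          rw [if_neg (show ¬(List.drop (j + 1) s).length ≤ 0 by omega),
              if_neg (show ¬False from not_false)]
          split_ifs with hm <;>
            rw [ih _ _ (by simp [List.length_drop] at hlen ⊢ <;> omega)] <;>
            (congr 1; simp [List.append_assoc])
        | none =>
          have hnp : nextParen ((s.drop (j + 1)).drop (countSpaces (s.drop (j + 1)))) =
              ((s.drop (j + 1)).drop (countSpaces (s.drop (j + 1))), []) := by
            unfold nextParen
            rw [npLoop_none _ _ _ _ hb]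
            simp [List.drop_eq_nil_of_le]
          simp only [hsf, hss, hnp, hb, hd]
          rw [if_neg (show ¬(List.drop (j + 1) s).length ≤ 0 by omega),
              if_neg (show ¬False from not_false)]
          split_ifs with hm <;>
            rw [ih _ _ (by simp [List.length_drop] at hlen ⊢ <;> omega)] <;>
            (congr 1; simp [List.append_assoc])

-- ===== VERDICT (by name: the statement is the Claim_ definition above) =====
theorem replaceLongExponentByHat_spec : Claim_equal_replaceLongExponentByHat := by
  intro rate maxlen _
  unfold Spec_replaceLongExponentByHat replaceLongExponentByHat replaceLongExponentByHat_alt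
  rw [main_eq maxlen (rate.toList.length + 1) rate.toList [] (by omega)]
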